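-- pv_equiv track=rewrite | github.com/ckoons/BubbleSpacetimeTheory | play/toy_617_a13_recovery.py | build_spectrum
-- ===== SOURCE A (Python) =====
-- def _dim_B(p, q, r):
--     lam = [0] * (r + 1)
--     lam[1] = p; lam[2] = q
--     L = [0] * (r + 1); P = [0] * (r + 1)
--     for i in range(1, r + 1):
--         P[i] = 2 * r - 2 * i + 1
--         L[i] = 2 * lam[i] + P[i]
--     num = den = 1
--     for i in range(1, r + 1):
--         for j in range(i + 1, r + 1):
--             num *= (L[i]**2 - L[j]**2)
--             den *= (P[i]**2 - P[j]**2)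
--     for i in range(1, r + 1):
--         num *= L[i]; den *= P[i]
--     return num // den
--
-- def _dim_D(p, q, r):
--     lam = [0] * (r + 1)
--     lam[1] = p; lam[2] = q
--     l = [0] * (r + 1); rho = [0] * (r + 1)
--     for i in range(1, r + 1):
--         rho[i] = r - i; l[i] = lam[i] + rho[i]
--     num = den = 1
--     for i in range(1, r + 1):
--         for j in range(i + 1, r + 1):
--             num *= (l[i]**2 - l[j]**2)
--             d = rho[i]**2 - rho[j]**2
--             if d == 0: return 0
--             den *= d
--     return num // den
--
-- def dim_SO(p, q, N):
--     if N < 5: raise ValueError(f"Need N >= 5, got {N}")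
--     return _dim_B(p, q, (N - 1) // 2) if N % 2 == 1 else _dim_D(p, q, N // 2)
--
-- def build_spectrum(n, P_max):
--     N = n + 2
--     spec = {}
--     for p in range(P_max):
--         for q in range(p + 1):
--             lam = p * (p + n) + q * (q + n - 2)
--             d = dim_SO(p, q, N)
--             if d > 0:
--                 spec[lam] = spec.get(lam, 0) + d
--     items = sorted(spec.items())
--     return [lam for lam, _ in items], [d for _, d in items]
-- ===== SOURCE B (Python) =====
-- def _dim_SO_fast(p, q, N):
--     # Weyl dimension formula specialised to highest weight (p, q, 0, ..., 0):
--     # every pair factor with both indices >= 3 is identical in numerator and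
--     # denominator, so only the rows i in {1, 2} are iterated: O(r) per weight.
--     if N < 5:
--         raise ValueError(f"Need N >= 5, got {N}")
--     if N % 2 == 1:
--         r = (N - 1) // 2
--         L1 = 2 * p + 2 * r - 1
--         L2 = 2 * q + 2 * r - 3
--         P1 = 2 * r - 1
--         P2 = 2 * r - 3
--         num = (L1 * L1 - L2 * L2) * L1 * L2
--         den = (P1 * P1 - P2 * P2) * P1 * P2
--         for j in range(3, r + 1):
--             Pj = 2 * r - 2 * j + 1
--             num *= (L1 * L1 - Pj * Pj) * (L2 * L2 - Pj * Pj)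
--             den *= (P1 * P1 - Pj * Pj) * (P2 * P2 - Pj * Pj)
--         return num // den
--     else:
--         r = N // 2
--         l1 = p + r - 1
--         l2 = q + r - 2
--         rho1 = r - 1
--         rho2 = r - 2
--         num = l1 * l1 - l2 * l2
--         den = rho1 * rho1 - rho2 * rho2
--         for j in range(3, r + 1):
--             rhoj = r - j
--             num *= (l1 * l1 - rhoj * rhoj) * (l2 * l2 - rhoj * rhoj)
--             den *= (rho1 * rho1 - rhoj * rhoj) * (rho2 * rho2 - rhoj * rhoj)
--         return num // den
--
-- def build_spectrum(n, P_max):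
--     N = n + 2
--     spec = {}
--     for p in range(P_max):
--         for q in range(p + 1):
--             lam = p * (p + n) + q * (q + n - 2)
--             d = _dim_SO_fast(p, q, N)
--             if d > 0:
--                 spec[lam] = spec.get(lam, 0) + d
--     items = sorted(spec.items())
--     return [lam for lam, _ in items], [d for _, d in items]
-- ===== Notes on version B (the rewrite author's own statement) =====
-- stated objective: faster
-- what changed: The Weyl dimension product is specialised to highest weight (p,q,0,...,0): every pair factor with both indices >= 3 is identical in numerator and denominator and cancels, so B iterates only the rows i in {1,2} (O(r) per weight instead of O(r^2)); the aggregation loop is unchanged.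
import Mathlib
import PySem

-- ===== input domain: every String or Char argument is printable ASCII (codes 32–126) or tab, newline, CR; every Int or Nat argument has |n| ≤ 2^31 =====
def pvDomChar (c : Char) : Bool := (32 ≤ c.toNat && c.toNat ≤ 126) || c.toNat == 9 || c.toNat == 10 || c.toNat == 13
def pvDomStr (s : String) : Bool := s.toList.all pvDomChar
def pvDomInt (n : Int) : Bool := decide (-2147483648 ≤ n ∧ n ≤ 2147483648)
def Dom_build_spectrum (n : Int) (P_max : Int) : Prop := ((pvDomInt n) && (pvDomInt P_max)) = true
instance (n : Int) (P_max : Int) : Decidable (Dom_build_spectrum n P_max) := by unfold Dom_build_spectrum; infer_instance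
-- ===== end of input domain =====

-- B computes each SO(N) representation dimension with an O(r) product instead of A's
-- O(r^2) pair product (the pair factors with both indices >= 3 cancel between numerator
-- and denominator); the aggregation loop is unchanged.  Return-value equivalence.

-- ===== PORT A =====
-- _dim_B: loops transliterated as folds over pyRange; list writes/reads via pySetD/pyGetD.
def dimB_A (p q r : Int) : Int :=
  let lam := PySem.List.pySetD (PySem.List.pySetD (List.replicate (r+1).toNat (0:Int)) 1 p) 2 q
  let LP := (PySem.List.pyRange 1 (r+1) 1).foldl
    (fun (LP : List Int × List Int) i =>
      let P' := PySem.List.pySetD LP.2 i (2*r - 2*i + 1)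
      (PySem.List.pySetD LP.1 i (2 * PySem.List.pyGetD lam i 0 + PySem.List.pyGetD P' i 0), P'))
    (List.replicate (r+1).toNat (0:Int), List.replicate (r+1).toNat (0:Int))
  let nd := (PySem.List.pyRange 1 (r+1) 1).foldl
    (fun (nd : Int × Int) i =>
      (PySem.List.pyRange (i+1) (r+1) 1).foldl
        (fun (nd : Int × Int) j =>
          (nd.1 * ((PySem.List.pyGetD LP.1 i 0)^2 - (PySem.List.pyGetD LP.1 j 0)^2),
           nd.2 * ((PySem.List.pyGetD LP.2 i 0)^2 - (PySem.List.pyGetD LP.2 j 0)^2))) nd)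
    (1, 1)
  let nd2 := (PySem.List.pyRange 1 (r+1) 1).foldl
    (fun (nd : Int × Int) i =>
      (nd.1 * PySem.List.pyGetD LP.1 i 0, nd.2 * PySem.List.pyGetD LP.2 i 0)) nd
  PySem.Int.floordiv nd2.1 nd2.2

-- _dim_D: the early `return 0` is modelled by an Option accumulator (none = returned 0).
def dimD_A (p q r : Int) : Int :=
  let lam := PySem.List.pySetD (PySem.List.pySetD (List.replicate (r+1).toNat (0:Int)) 1 p) 2 q
  let lrho := (PySem.List.pyRange 1 (r+1) 1).foldl
    (fun (lrho : List Int × List Int) i =>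
      let rho' := PySem.List.pySetD lrho.2 i (r - i)
      (PySem.List.pySetD lrho.1 i (PySem.List.pyGetD lam i 0 + PySem.List.pyGetD rho' i 0), rho'))
    (List.replicate (r+1).toNat (0:Int), List.replicate (r+1).toNat (0:Int))
  let res := (PySem.List.pyRange 1 (r+1) 1).foldl
    (fun (acc : Option (Int × Int)) i =>
      (PySem.List.pyRange (i+1) (r+1) 1).foldl
        (fun (acc : Option (Int × Int)) j => acc.bind (fun nd =>
          let nu' := nd.1 * ((PySem.List.pyGetD lrho.1 i 0)^2 - (PySem.List.pyGetD lrho.1 j 0)^2)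
          let d := (PySem.List.pyGetD lrho.2 i 0)^2 - (PySem.List.pyGetD lrho.2 j 0)^2
          if d = 0 then none else some (nu', nd.2 * d))) acc)
    (some (1, 1))
  match res with
  | none => 0
  | some nd => PySem.Int.floordiv nd.1 nd.2

-- dim_SO: Python raises ValueError for N < 5 (those inputs are excluded by Pre_; the port returns 0 there).
def dimSO_A (p q N : Int) : Int :=
  if N < 5 then 0
  else if PySem.Int.mod N 2 = 1 then dimB_A p q (PySem.Int.floordiv (N-1) 2)
  else dimD_A p q (PySem.Int.floordiv N 2)

def build_spectrum (n : Int) (P_max : Int) : List Int × List Int :=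
  let N := n + 2
  let spec := (PySem.List.pyRange 0 P_max 1).foldl
    (fun (spec : PySem.Dict Int Int) p =>
      (PySem.List.pyRange 0 (p+1) 1).foldl
        (fun (spec : PySem.Dict Int Int) q =>
          let lam := p * (p + n) + q * (q + n - 2)
          let d := dimSO_A p q N
          if d > 0 then spec.insert lam (spec.getD lam 0 + d) else spec) spec)
    PySem.Dict.empty
  let items := PySem.List.sorted2 spec.items (fun x => x.1) (fun x => x.2)
  (items.map (fun x => x.1), items.map (fun x => x.2))

-- ===== PORT B =====
def dimB_B (p q r : Int) : Int :=
  let L1 := 2*p + 2*r - 1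
  let L2 := 2*q + 2*r - 3
  let P1 := 2*r - 1
  let P2 := 2*r - 3
  let nd := (PySem.List.pyRange 3 (r+1) 1).foldl
    (fun (nd : Int × Int) j =>
      let Pj := 2*r - 2*j + 1
      (nd.1 * ((L1*L1 - Pj*Pj) * (L2*L2 - Pj*Pj)),
       nd.2 * ((P1*P1 - Pj*Pj) * (P2*P2 - Pj*Pj))))
    ((L1*L1 - L2*L2) * L1 * L2, (P1*P1 - P2*P2) * P1 * P2)
  PySem.Int.floordiv nd.1 nd.2

def dimD_B (p q r : Int) : Int :=
  let l1 := p + r - 1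
  let l2 := q + r - 2
  let rho1 := r - 1
  let rho2 := r - 2
  let nd := (PySem.List.pyRange 3 (r+1) 1).foldl
    (fun (nd : Int × Int) j =>
      let rhoj := r - j
      (nd.1 * ((l1*l1 - rhoj*rhoj) * (l2*l2 - rhoj*rhoj)),
       nd.2 * ((rho1*rho1 - rhoj*rhoj) * (rho2*rho2 - rhoj*rhoj))))
    (l1*l1 - l2*l2, rho1*rho1 - rho2*rho2)
  PySem.Int.floordiv nd.1 nd.2

def dimSO_B (p q N : Int) : Int :=
  if N < 5 then 0
  else if PySem.Int.mod N 2 = 1 then dimB_B p q (PySem.Int.floordiv (N-1) 2)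
  else dimD_B p q (PySem.Int.floordiv N 2)

def build_spectrum_alt (n : Int) (P_max : Int) : List Int × List Int :=
  let N := n + 2
  let spec := (PySem.List.pyRange 0 P_max 1).foldl
    (fun (spec : PySem.Dict Int Int) p =>
      (PySem.List.pyRange 0 (p+1) 1).foldl
        (fun (spec : PySem.Dict Int Int) q =>
          let lam := p * (p + n) + q * (q + n - 2)
          let d := dimSO_B p q N
          if d > 0 then spec.insert lam (spec.getD lam 0 + d) else spec) spec)
    PySem.Dict.empty
  let items := PySem.List.sorted2 spec.items (fun x => x.1) (fun x => x.2)
  (items.map (fun x => x.1), items.map (fun x => x.2))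

-- ===== PRECONDITION & SPEC =====
-- Python's dim_SO raises ValueError when N = n+2 < 5 and it is reached (P_max > 0);
-- Pre_ excludes exactly those inputs.
def Pre_build_spectrum (n : Int) (P_max : Int) : Prop := 3 ≤ n ∨ P_max ≤ 0
instance (n : Int) (P_max : Int) : Decidable (Pre_build_spectrum n P_max) := by
  unfold Pre_build_spectrum; infer_instance

def pvWitness_build_spectrum : Int × Int := (3, 4)

def Spec_build_spectrum (n : Int) (P_max : Int) (out : List Int × List Int) : Prop := out = build_spectrum_alt n P_max
instance (n : Int) (P_max : Int) (out : List Int × List Int) : Decidable (Spec_build_spectrum n P_max out) := by unfold Spec_build_spectrum; infer_instance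

-- ===== CLAIM (what is proved, stated in full; the proofs are below) =====
def Claim_equal_build_spectrum : Prop := ∀ (n : Int) (P_max : Int), Dom_build_spectrum n P_max → Pre_build_spectrum n P_max → Spec_build_spectrum n P_max (build_spectrum n P_max)

-- ===== LEMMAS AND PROOFS =====

-- abbreviations for the row values of the two Weyl products (proof-side only)
def gP (r i : Int) : Int := 2*r - 2*i + 1
def gRho (r i : Int) : Int := r - i
def lamv (p q i : Int) : Int := if i = 1 then p else if i = 2 then q else 0
def gL (p q r i : Int) : Int := 2 * lamv p q i + gP r i
def gl (p q r i : Int) : Int := lamv p q i + gRho r i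

-- a multiplicative accumulator loop is a product
theorem foldl_mul_prod (f : Int → Int) (l : List Int) (a : Int) :
    l.foldl (fun acc x => acc * f x) a = a * (l.map f).prod := by
  induction l generalizing a with
  | nil => simp
  | cons x t ih => simp [List.foldl_cons, ih (a * f x), mul_assoc]

-- a pair of multiplicative accumulators is a pair of products
theorem foldl_pair_mul (F G : Int → Int) (l : List Int) (a b : Int) :
    l.foldl (fun (nd : Int × Int) x => (nd.1 * F x, nd.2 * G x)) (a, b)
      = (a * (l.map F).prod, b * (l.map G).prod) := by
  rw [PySem.List.foldl_prod_mk (fun s e => s * F e) (fun s e => s * G e) l a b]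
  rw [foldl_mul_prod, foldl_mul_prod]

theorem foldl_opt_none {α σ : Type} (l : List α) (f : Option σ → α → Option σ)
    (h : ∀ x ∈ l, f none x = none) : l.foldl f none = none := by
  induction l with
  | nil => rfl
  | cons x t ih =>
    rw [List.foldl_cons, h x (by simp)]
    exact ih (fun y hy => h y (by simp [hy]))

theorem foldl_opt_prod (F G : Int → Int) (l : List Int)
    (step : Option (Int × Int) → Int → Option (Int × Int))
    (hnone : ∀ i ∈ l, step none i = none)
    (hsome : ∀ i ∈ l, ∀ a b : Int, step (some (a, b)) i = some (a * F i, b * G i)) :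
    ∀ a b : Int, l.foldl step (some (a, b)) = some (a * (l.map F).prod, b * (l.map G).prod) := by
  induction l with
  | nil => intro a b; simp
  | cons x t ih =>
    intro a b
    rw [List.foldl_cons, hsome x (by simp)]
    rw [ih (fun i hi => hnone i (by simp [hi])) (fun i hi => hsome i (by simp [hi]))]
    simp [mul_assoc]

-- reading an entry of a filled list  0 :: map g (range 1 (k+1)) ++ tail
theorem pyGetD_fill_tail (g : Int → Int) (k i : Int) (tail : List Int)
    (h1 : 1 ≤ i) (h2 : i ≤ k) :
    PySem.List.pyGetD ((0 :: (PySem.List.pyRange 1 (k+1) 1).map g) ++ tail) i 0 = g i := by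
  have hlen : ((0 :: (PySem.List.pyRange 1 (k+1) 1).map g)).length = 1 + k.toNat := by
    simp only [List.length_cons, List.length_map, PySem.List.length_pyRange_one]; omega
  have hi0 : (0:Int) ≤ i := by omega
  have hilt : i < (((0 :: (PySem.List.pyRange 1 (k+1) 1).map g) ++ tail).length : Int) := by
    rw [List.length_append, hlen]; push_cast; omega
  rw [PySem.List.pyGetD_eq_getElem _ _ hi0 hilt]
  have hlt : i.toNat < (0 :: (PySem.List.pyRange 1 (k+1) 1).map g).length := by omega
  rw [List.getElem_append_left hlt]
  obtain ⟨m, hm⟩ : ∃ m, i.toNat = m + 1 := ⟨i.toNat - 1, by omega⟩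
  simp only [hm, List.getElem_cons_succ, List.getElem_map, PySem.List.getElem_pyRange_one]
  congr 1; omega

theorem pyGetD_fill (g : Int → Int) (k i : Int) (h1 : 1 ≤ i) (h2 : i ≤ k) :
    PySem.List.pyGetD (0 :: (PySem.List.pyRange 1 (k+1) 1).map g) i 0 = g i := by
  have := pyGetD_fill_tail g k i [] h1 h2
  simpa using this

-- the lam list set up by both _dim_ helpers
theorem lam_get (p q r i : Int) (hr : 2 ≤ r) (h1 : 1 ≤ i) (h2 : i ≤ r) :
    PySem.List.pyGetD
      (PySem.List.pySetD (PySem.List.pySetD (List.replicate (r+1).toNat (0:Int)) 1 p) 2 q) i 0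
      = lamv p q i := by
  have h0 : (0:Int) ≤ i := by omega
  rw [PySem.List.pySetD_of_nonneg _ _ (by norm_num), PySem.List.pySetD_of_nonneg _ _ (by norm_num)]
  have hlen : (((List.replicate (r+1).toNat (0:Int)).set (1:Int).toNat p).set (2:Int).toNat q).length
      = (r+1).toNat := by simp
  rw [PySem.List.pyGetD_eq_getElem _ _ h0 (by rw [hlen]; omega)]
  simp only [List.getElem_set, List.getElem_replicate]
  unfold lamv
  split_ifs <;> first | rfl | omega

-- the coupled fill loop writes g-values at positions 1..r
theorem fill_fold (lam : List Int) (w : Int → Int) (u : Int → Int → Int) (r : Int) (hr : 0 ≤ r) :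
    (PySem.List.pyRange 1 (r+1) 1).foldl
      (fun (AB : List Int × List Int) i =>
        (PySem.List.pySetD AB.1 i
            (u (PySem.List.pyGetD lam i 0)
               (PySem.List.pyGetD (PySem.List.pySetD AB.2 i (w i)) i 0)),
         PySem.List.pySetD AB.2 i (w i)))
      (List.replicate (r+1).toNat 0, List.replicate (r+1).toNat 0)
    = (0 :: (PySem.List.pyRange 1 (r+1) 1).map
          (fun i => u (PySem.List.pyGetD lam i 0) (w i)),
       0 :: (PySem.List.pyRange 1 (r+1) 1).map w) := by
  suffices H : ∀ m : Nat, (m:Int) ≤ r →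
      (PySem.List.pyRange 1 ((m:Int)+1) 1).foldl
        (fun (AB : List Int × List Int) i =>
          (PySem.List.pySetD AB.1 i
              (u (PySem.List.pyGetD lam i 0)
                 (PySem.List.pyGetD (PySem.List.pySetD AB.2 i (w i)) i 0)),
           PySem.List.pySetD AB.2 i (w i)))
        (List.replicate (r+1).toNat 0, List.replicate (r+1).toNat 0)
      = ((0 :: (PySem.List.pyRange 1 ((m:Int)+1) 1).map
            (fun i => u (PySem.List.pyGetD lam i 0) (w i))) ++ List.replicate (r-(m:Int)).toNat 0,
         (0 :: (PySem.List.pyRange 1 ((m:Int)+1) 1).map w) ++ List.replicate (r-(m:Int)).toNat 0) by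
    have h := H r.toNat (by omega)
    rw [Int.toNat_of_nonneg hr] at h
    simpa using h
  intro m
  induction m with
  | zero =>
    intro _
    rw [PySem.List.pyRange_one_eq_nil (by norm_num)]
    have : (r+1).toNat = r.toNat + 1 := by omega
    simp [this, List.replicate_succ]
  | succ m ih =>
    intro hm1
    have hc2 : (((m+1 : Nat)):Int) = (m:Int) + 1 := by push_cast; ring
    have hm : (m:Int) ≤ r := by omega
    have hmr : (m:Int) + 1 ≤ r := by omega
    rw [hc2, PySem.List.pyRange_one_succ_right (by omega : (1:Int) ≤ (m:Int)+1),
        List.foldl_append, ih hm]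
    simp only [List.foldl_cons, List.foldl_nil]
    have hsetgen : ∀ (xs : List Int) (v : Int), xs.length = m →
        PySem.List.pySetD ((0 :: xs) ++ List.replicate (r-(m:Int)).toNat 0) ((m:Int)+1) v
        = (0 :: (xs ++ [v])) ++ List.replicate ((r-(m:Int))-1).toNat 0 := by
      intro xs v hxs
      rw [PySem.List.pySetD_of_nonneg _ _ (by omega)]
      have ht : ((m:Int)+1).toNat = m + 1 := by omega
      have hrep : (r-(m:Int)).toNat = ((r-(m:Int))-1).toNat + 1 := by omega
      rw [ht, hrep, List.replicate_succ, List.set_append]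
      simp [hxs]
    have hlenw : ((PySem.List.pyRange 1 ((m:Int)+1) 1).map w).length = m := by
      simp only [List.length_map, PySem.List.length_pyRange_one]; omega
    have hlenu : ((PySem.List.pyRange 1 ((m:Int)+1) 1).map
        (fun i => u (PySem.List.pyGetD lam i 0) (w i))).length = m := by
      simp only [List.length_map, PySem.List.length_pyRange_one]; omega
    have hmap : ∀ g : Int → Int,
        (PySem.List.pyRange 1 (((m:Int)+1)+1) 1).map g
        = (PySem.List.pyRange 1 ((m:Int)+1) 1).map g ++ [g ((m:Int)+1)] := by
      intro g
      rw [PySem.List.pyRange_one_succ_right (by omega : (1:Int) ≤ (m:Int)+1), List.map_append]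
      rfl
    have hsec : PySem.List.pySetD
          ((0 :: (PySem.List.pyRange 1 ((m:Int)+1) 1).map w) ++ List.replicate (r-(m:Int)).toNat 0)
          ((m:Int)+1) (w ((m:Int)+1))
        = (0 :: (PySem.List.pyRange 1 (((m:Int)+1)+1) 1).map w)
            ++ List.replicate ((r-(m:Int))-1).toNat 0 := by
      rw [hsetgen _ _ hlenw, hmap w]
    have hget : PySem.List.pyGetD
        ((0 :: (PySem.List.pyRange 1 (((m:Int)+1)+1) 1).map w)
          ++ List.replicate ((r-(m:Int))-1).toNat 0) ((m:Int)+1) 0 = w ((m:Int)+1) :=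
      pyGetD_fill_tail w ((m:Int)+1) ((m:Int)+1) _ (by omega) le_rfl
    have hfst : PySem.List.pySetD
          ((0 :: (PySem.List.pyRange 1 ((m:Int)+1) 1).map
              (fun i => u (PySem.List.pyGetD lam i 0) (w i)))
            ++ List.replicate (r-(m:Int)).toNat 0)
          ((m:Int)+1) (u (PySem.List.pyGetD lam ((m:Int)+1) 0) (w ((m:Int)+1)))
        = (0 :: (PySem.List.pyRange 1 (((m:Int)+1)+1) 1).map
              (fun i => u (PySem.List.pyGetD lam i 0) (w i)))
            ++ List.replicate ((r-(m:Int))-1).toNat 0 := by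
      rw [hsetgen _ _ hlenu, hmap (fun i => u (PySem.List.pyGetD lam i 0) (w i))]
    have hc3 : (r - ((m:Int)+1)).toNat = ((r-(m:Int))-1).toNat := by omega
    simp only [hc3]
    simp only [hsec, hget, hfst]
    simp [hmap]


-- abbreviations for the inner pair products (proof-side only)
def NFB (p q r i : Int) : Int :=
  ((PySem.List.pyRange (i+1) (r+1) 1).map (fun j => (gL p q r i)^2 - (gL p q r j)^2)).prod
def DFB (r i : Int) : Int :=
  ((PySem.List.pyRange (i+1) (r+1) 1).map (fun j => (gP r i)^2 - (gP r j)^2)).prod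
def NFD (p q r i : Int) : Int :=
  ((PySem.List.pyRange (i+1) (r+1) 1).map (fun j => (gl p q r i)^2 - (gl p q r j)^2)).prod
def DFD (r i : Int) : Int :=
  ((PySem.List.pyRange (i+1) (r+1) 1).map (fun j => (gRho r i)^2 - (gRho r j)^2)).prod

theorem fdiv_scale (a b c d e : Int) (he : 0 < e) (h1 : a = c * e) (h2 : b = d * e) :
    PySem.Int.floordiv a b = PySem.Int.floordiv c d := by
  subst h1; subst h2
  show (c*e).fdiv (d*e) = c.fdiv d
  rw [mul_comm c e, mul_comm d e]
  exact Int.mul_fdiv_mul_of_pos _ _ he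

theorem gL_eq_gP (p q r j : Int) (h : 3 ≤ j) : gL p q r j = gP r j := by
  simp [gL, lamv, show j ≠ 1 by omega, show j ≠ 2 by omega]

theorem gl_eq_gRho (p q r j : Int) (h : 3 ≤ j) : gl p q r j = gRho r j := by
  simp [gl, lamv, show j ≠ 1 by omega, show j ≠ 2 by omega]

theorem gP_pos (r i : Int) (h : i ≤ r) : 0 < gP r i := by simp [gP]; omega

theorem gP_sq_lt (r i j : Int) (hij : i < j) (hj : j ≤ r) : (gP r j)^2 < (gP r i)^2 := by
  have h1 : 0 < gP r j := gP_pos r j hj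
  have h2 : gP r j < gP r i := by simp [gP]; omega
  nlinarith

theorem gRho_sq_lt (r i j : Int) (_hi : 1 ≤ i) (hij : i < j) (hj : j ≤ r) :
    (gRho r j)^2 < (gRho r i)^2 := by
  have h1 : 0 ≤ gRho r j := by simp [gRho]; omega
  have h2 : gRho r j < gRho r i := by simp [gRho]; omega
  nlinarith

theorem DFB_pos (r i : Int) (_hr : i ≤ r) : 0 < DFB r i := by
  apply List.prod_pos
  intro a ha
  obtain ⟨j, hj, rfl⟩ := List.mem_map.mp ha
  rw [PySem.List.mem_pyRange_one] at hj
  have := gP_sq_lt r i j (by omega) (by omega)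
  omega

theorem DFD_pos (r i : Int) (hi : 1 ≤ i) (_hr : i ≤ r) : 0 < DFD r i := by
  apply List.prod_pos
  intro a ha
  obtain ⟨j, hj, rfl⟩ := List.mem_map.mp ha
  rw [PySem.List.mem_pyRange_one] at hj
  have := gRho_sq_lt r i j hi (by omega) (by omega)
  omega

theorem inner_optfold_eval (A B : Int → Int) (LL PP : List Int) (lo hi : Int)
    (hA : ∀ j, lo ≤ j → j < hi → PySem.List.pyGetD LL j 0 = A j)
    (hB : ∀ j, lo ≤ j → j < hi → PySem.List.pyGetD PP j 0 = B j)
    (vi wi : Int)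
    (hnz : ∀ j, lo ≤ j → j < hi → wi - (B j)^2 ≠ 0) (a b : Int) :
    (PySem.List.pyRange lo hi 1).foldl
      (fun (acc : Option (Int × Int)) j => acc.bind (fun nd =>
        let nu' := nd.1 * (vi - (PySem.List.pyGetD LL j 0)^2)
        let d := wi - (PySem.List.pyGetD PP j 0)^2
        if d = 0 then none else some (nu', nd.2 * d))) (some (a, b))
    = some (a * ((PySem.List.pyRange lo hi 1).map (fun j => vi - (A j)^2)).prod,
            b * ((PySem.List.pyRange lo hi 1).map (fun j => wi - (B j)^2)).prod) := by
  refine foldl_opt_prod (fun j => vi - (A j)^2) (fun j => wi - (B j)^2) _ _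
    (fun j _ => rfl) ?_ a b
  intro j hj a' b'
  rw [PySem.List.mem_pyRange_one] at hj
  simp only [Option.bind_some]
  rw [hA j hj.1 hj.2, hB j hj.1 hj.2]
  exact if_neg (hnz j hj.1 hj.2)

-- the inner pair loop of the product, values read off the filled lists
theorem inner_fold_eval (A B : Int → Int) (LL PP : List Int) (lo hi : Int)
    (hA : ∀ j, lo ≤ j → j < hi → PySem.List.pyGetD LL j 0 = A j)
    (hB : ∀ j, lo ≤ j → j < hi → PySem.List.pyGetD PP j 0 = B j)
    (vi wi : Int) (a b : Int) :
    (PySem.List.pyRange lo hi 1).foldl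
      (fun (nd : Int × Int) j =>
        (nd.1 * (vi - (PySem.List.pyGetD LL j 0)^2), nd.2 * (wi - (PySem.List.pyGetD PP j 0)^2)))
      (a, b)
    = (a * ((PySem.List.pyRange lo hi 1).map (fun j => vi - (A j)^2)).prod,
       b * ((PySem.List.pyRange lo hi 1).map (fun j => wi - (B j)^2)).prod) := by
  rw [PySem.List.foldl_congr_mem _ _
      (fun (nd : Int × Int) j => (nd.1 * (vi - (A j)^2), nd.2 * (wi - (B j)^2))) (a, b)
      (by
        intro acc j hj
        rw [PySem.List.mem_pyRange_one] at hj
        rw [hA j hj.1 hj.2, hB j hj.1 hj.2])]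
  exact foldl_pair_mul _ _ _ a b

theorem singles_fold_eval (A B : Int → Int) (LL PP : List Int) (lo hi : Int)
    (hA : ∀ j, lo ≤ j → j < hi → PySem.List.pyGetD LL j 0 = A j)
    (hB : ∀ j, lo ≤ j → j < hi → PySem.List.pyGetD PP j 0 = B j)
    (a b : Int) :
    (PySem.List.pyRange lo hi 1).foldl
      (fun (nd : Int × Int) i => (nd.1 * PySem.List.pyGetD LL i 0, nd.2 * PySem.List.pyGetD PP i 0))
      (a, b)
    = (a * ((PySem.List.pyRange lo hi 1).map (fun i => A i)).prod,
       b * ((PySem.List.pyRange lo hi 1).map (fun i => B i)).prod) := by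
  rw [PySem.List.foldl_congr_mem _ _
      (fun (nd : Int × Int) i => (nd.1 * A i, nd.2 * B i)) (a, b)
      (by
        intro acc i hi'
        rw [PySem.List.mem_pyRange_one] at hi'
        rw [hA i hi'.1 hi'.2, hB i hi'.1 hi'.2])]
  exact foldl_pair_mul _ _ _ a b

theorem outer_fold_eval (f g : Int → Int) (step : Int × Int → Int → Int × Int) (l : List Int)
    (hstep : ∀ (nd : Int × Int), ∀ i ∈ l, step nd i = (nd.1 * f i, nd.2 * g i)) (a b : Int) :
    l.foldl step (a, b) = (a * (l.map f).prod, b * (l.map g).prod) := by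
  rw [PySem.List.foldl_congr_mem l step (fun nd i => (nd.1 * f i, nd.2 * g i)) (a, b) hstep]
  exact foldl_pair_mul f g l a b

theorem dimB_eq (p q r : Int) (hr : 2 ≤ r) : dimB_A p q r = dimB_B p q r := by
  simp only [dimB_A, dimB_B]
  rw [fill_fold (PySem.List.pySetD (PySem.List.pySetD (List.replicate (r+1).toNat (0:Int)) 1 p) 2 q)
      (fun i => 2*r - 2*i + 1) (fun a b => 2*a + b) r (by omega)]
  set ALL := (0 : Int) :: (PySem.List.pyRange 1 (r+1) 1).map
      (fun i => 2 * PySem.List.pyGetD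
          (PySem.List.pySetD (PySem.List.pySetD (List.replicate (r+1).toNat (0:Int)) 1 p) 2 q) i 0
        + (2*r - 2*i + 1)) with hALL
  set APP := (0 : Int) :: (PySem.List.pyRange 1 (r+1) 1).map (fun i => 2*r - 2*i + 1) with hAPP
  have hgetL : ∀ i : Int, 1 ≤ i → i < r+1 → PySem.List.pyGetD ALL i 0 = gL p q r i := by
    intro i h1 h2
    rw [hALL, pyGetD_fill _ r i h1 (by omega), lam_get p q r i hr h1 (by omega)]
    rfl
  have hgetP : ∀ i : Int, 1 ≤ i → i < r+1 → PySem.List.pyGetD APP i 0 = gP r i := by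
    intro i h1 h2
    rw [hAPP, pyGetD_fill _ r i h1 (by omega)]
    rfl
  have houter : ∀ (nd : Int × Int), ∀ i ∈ PySem.List.pyRange 1 (r+1) 1,
      (PySem.List.pyRange (i+1) (r+1) 1).foldl
        (fun (nd : Int × Int) j =>
          (nd.1 * ((PySem.List.pyGetD ALL i 0)^2 - (PySem.List.pyGetD ALL j 0)^2),
           nd.2 * ((PySem.List.pyGetD APP i 0)^2 - (PySem.List.pyGetD APP j 0)^2))) nd
      = (nd.1 * NFB p q r i, nd.2 * DFB r i) := by
    intro nd i hi
    rw [PySem.List.mem_pyRange_one] at hi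
    rw [inner_fold_eval (gL p q r) (gP r) ALL APP (i+1) (r+1)
        (fun j hj1 hj2 => hgetL j (by omega) hj2)
        (fun j hj1 hj2 => hgetP j (by omega) hj2) _ _ nd.1 nd.2]
    rw [hgetL i hi.1 hi.2, hgetP i hi.1 hi.2]
    rfl
  rw [outer_fold_eval _ _ _ _ houter]
  rw [singles_fold_eval (gL p q r) (gP r) ALL APP 1 (r+1) hgetL hgetP]
  rw [foldl_pair_mul]
  -- split the outer range 1..r into rows 1, 2 and the cancelling block 3..r
  have hsplit : PySem.List.pyRange 1 (r+1) 1 = 1 :: 2 :: PySem.List.pyRange 3 (r+1) 1 := by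
    rw [PySem.List.pyRange_one_cons (by omega : (1:Int) < r+1)]
    rw [show (1:Int)+1 = 2 from by norm_num]
    rw [PySem.List.pyRange_one_cons (by omega : (2:Int) < r+1)]
    rw [show (2:Int)+1 = 3 from by norm_num]
  rw [hsplit]
  simp only [List.map_cons, List.prod_cons]
  -- expand the two kept numerator rows and rewrite gL to gP where the indices are >= 3
  have htail1 : ((PySem.List.pyRange 3 (r+1) 1).map (fun j => (gL p q r 1)^2 - (gL p q r j)^2))
      = ((PySem.List.pyRange 3 (r+1) 1).map (fun j => (gL p q r 1)^2 - (gP r j)^2)) :=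
    List.map_congr_left (fun j hj => by
      rw [PySem.List.mem_pyRange_one] at hj
      rw [gL_eq_gP p q r j (by omega)])
  have htail2 : ((PySem.List.pyRange 3 (r+1) 1).map (fun j => (gL p q r 2)^2 - (gL p q r j)^2))
      = ((PySem.List.pyRange 3 (r+1) 1).map (fun j => (gL p q r 2)^2 - (gP r j)^2)) :=
    List.map_congr_left (fun j hj => by
      rw [PySem.List.mem_pyRange_one] at hj
      rw [gL_eq_gP p q r j (by omega)])
  have hNFB1 : NFB p q r 1
      = ((gL p q r 1)^2 - (gL p q r 2)^2)
        * ((PySem.List.pyRange 3 (r+1) 1).map (fun j => (gL p q r 1)^2 - (gP r j)^2)).prod := by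
    simp only [NFB]
    rw [show (1:Int)+1 = 2 from by norm_num,
        PySem.List.pyRange_one_cons (by omega : (2:Int) < r+1),
        show (2:Int)+1 = 3 from by norm_num, List.map_cons, List.prod_cons, htail1]
  have hNFB2 : NFB p q r 2
      = ((PySem.List.pyRange 3 (r+1) 1).map (fun j => (gL p q r 2)^2 - (gP r j)^2)).prod := by
    simp only [NFB]
    rw [show (2:Int)+1 = 3 from by norm_num, htail2]
  have hDFB1 : DFB r 1
      = ((gP r 1)^2 - (gP r 2)^2)
        * ((PySem.List.pyRange 3 (r+1) 1).map (fun j => (gP r 1)^2 - (gP r j)^2)).prod := by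
    simp only [DFB]
    rw [show (1:Int)+1 = 2 from by norm_num,
        PySem.List.pyRange_one_cons (by omega : (2:Int) < r+1),
        show (2:Int)+1 = 3 from by norm_num, List.map_cons, List.prod_cons]
  have hDFB2 : DFB r 2
      = ((PySem.List.pyRange 3 (r+1) 1).map (fun j => (gP r 2)^2 - (gP r j)^2)).prod := by
    simp only [DFB]
    rw [show (2:Int)+1 = 3 from by norm_num]
  -- the rows with index >= 3 are identical in numerator and denominator
  have hNtail : ((PySem.List.pyRange 3 (r+1) 1).map (fun i => NFB p q r i))
      = ((PySem.List.pyRange 3 (r+1) 1).map (fun i => DFB r i)) :=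
    List.map_congr_left (fun i hi => by
      rw [PySem.List.mem_pyRange_one] at hi
      simp only [NFB, DFB]
      congr 1
      exact List.map_congr_left (fun j hj => by
        rw [PySem.List.mem_pyRange_one] at hj
        rw [gL_eq_gP p q r i (by omega), gL_eq_gP p q r j (by omega)]))
  have hStail : ((PySem.List.pyRange 3 (r+1) 1).map (fun i => gL p q r i))
      = ((PySem.List.pyRange 3 (r+1) 1).map (fun i => gP r i)) :=
    List.map_congr_left (fun i hi => by
      rw [PySem.List.mem_pyRange_one] at hi
      rw [gL_eq_gP p q r i (by omega)])
  rw [hNFB1, hNFB2, hDFB1, hDFB2, hNtail, hStail]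
  -- rewrite the B-side closed row values through gL/gP
  rw [show (2*p+2*r-1 : Int) = gL p q r 1 from by simp [gL, lamv, gP]; ring,
      show (2*q+2*r-3 : Int) = gL p q r 2 from by simp [gL, lamv, gP]; ring,
      show (2*r-1 : Int) = gP r 1 from by simp [gP]; ring,
      show (2*r-3 : Int) = gP r 2 from by simp [gP]; ring]
  have hBnum : ((PySem.List.pyRange 3 (r+1) 1).map
        (fun j => (gL p q r 1 * gL p q r 1 - (2*r-2*j+1) * (2*r-2*j+1))
                * (gL p q r 2 * gL p q r 2 - (2*r-2*j+1) * (2*r-2*j+1)))).prod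
      = ((PySem.List.pyRange 3 (r+1) 1).map (fun j => (gL p q r 1)^2 - (gP r j)^2)).prod
        * ((PySem.List.pyRange 3 (r+1) 1).map (fun j => (gL p q r 2)^2 - (gP r j)^2)).prod := by
    rw [← List.prod_map_mul]
    exact congrArg List.prod (List.map_congr_left (fun j hj => by simp only [gP]; ring))
  have hBden : ((PySem.List.pyRange 3 (r+1) 1).map
        (fun j => (gP r 1 * gP r 1 - (2*r-2*j+1) * (2*r-2*j+1))
                * (gP r 2 * gP r 2 - (2*r-2*j+1) * (2*r-2*j+1)))).prod
      = ((PySem.List.pyRange 3 (r+1) 1).map (fun j => (gP r 1)^2 - (gP r j)^2)).prod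
        * ((PySem.List.pyRange 3 (r+1) 1).map (fun j => (gP r 2)^2 - (gP r j)^2)).prod := by
    rw [← List.prod_map_mul]
    exact congrArg List.prod (List.map_congr_left (fun j hj => by simp only [gP]; ring))
  rw [hBnum, hBden]
  -- cancel the common block
  have hC1 : 0 < ((PySem.List.pyRange 3 (r+1) 1).map (fun i => DFB r i)).prod := by
    apply List.prod_pos
    intro a ha
    obtain ⟨i, hi, rfl⟩ := List.mem_map.mp ha
    rw [PySem.List.mem_pyRange_one] at hi
    exact DFB_pos r i (by omega)
  have hC2 : 0 < ((PySem.List.pyRange 3 (r+1) 1).map (fun i => gP r i)).prod := by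
    apply List.prod_pos
    intro a ha
    obtain ⟨i, hi, rfl⟩ := List.mem_map.mp ha
    rw [PySem.List.mem_pyRange_one] at hi
    exact gP_pos r i (by omega)
  refine fdiv_scale _ _ _ _
    (((PySem.List.pyRange 3 (r+1) 1).map (fun i => DFB r i)).prod
      * ((PySem.List.pyRange 3 (r+1) 1).map (fun i => gP r i)).prod)
    (mul_pos hC1 hC2) (by ring) (by ring)

theorem dimD_eq (p q r : Int) (hr : 3 ≤ r) : dimD_A p q r = dimD_B p q r := by
  simp only [dimD_A, dimD_B]
  rw [fill_fold (PySem.List.pySetD (PySem.List.pySetD (List.replicate (r+1).toNat (0:Int)) 1 p) 2 q)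
      (fun i => r - i) (fun a b => a + b) r (by omega)]
  set ALL := (0 : Int) :: (PySem.List.pyRange 1 (r+1) 1).map
      (fun i => PySem.List.pyGetD
          (PySem.List.pySetD (PySem.List.pySetD (List.replicate (r+1).toNat (0:Int)) 1 p) 2 q) i 0
        + (r - i)) with hALL
  set APP := (0 : Int) :: (PySem.List.pyRange 1 (r+1) 1).map (fun i => r - i) with hAPP
  have hgetl : ∀ i : Int, 1 ≤ i → i < r+1 → PySem.List.pyGetD ALL i 0 = gl p q r i := by
    intro i h1 h2
    rw [hALL, pyGetD_fill _ r i h1 (by omega), lam_get p q r i (by omega) h1 (by omega)]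
    rfl
  have hgetRho : ∀ i : Int, 1 ≤ i → i < r+1 → PySem.List.pyGetD APP i 0 = gRho r i := by
    intro i h1 h2
    rw [hAPP, pyGetD_fill _ r i h1 (by omega)]
    rfl
  have hnone : ∀ i ∈ PySem.List.pyRange 1 (r+1) 1,
      (PySem.List.pyRange (i+1) (r+1) 1).foldl
        (fun (acc : Option (Int × Int)) j => acc.bind (fun nd =>
          let nu' := nd.1 * ((PySem.List.pyGetD ALL i 0)^2 - (PySem.List.pyGetD ALL j 0)^2)
          let d := (PySem.List.pyGetD APP i 0)^2 - (PySem.List.pyGetD APP j 0)^2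
          if d = 0 then none else some (nu', nd.2 * d))) none = none :=
    fun i _ => foldl_opt_none _ _ (fun j _ => rfl)
  have hsome : ∀ i ∈ PySem.List.pyRange 1 (r+1) 1, ∀ a b : Int,
      (PySem.List.pyRange (i+1) (r+1) 1).foldl
        (fun (acc : Option (Int × Int)) j => acc.bind (fun nd =>
          let nu' := nd.1 * ((PySem.List.pyGetD ALL i 0)^2 - (PySem.List.pyGetD ALL j 0)^2)
          let d := (PySem.List.pyGetD APP i 0)^2 - (PySem.List.pyGetD APP j 0)^2
          if d = 0 then none else some (nu', nd.2 * d))) (some (a, b))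
      = some (a * NFD p q r i, b * DFD r i) := by
    intro i hi a b
    rw [PySem.List.mem_pyRange_one] at hi
    rw [hgetl i hi.1 hi.2, hgetRho i hi.1 hi.2]
    rw [inner_optfold_eval (gl p q r) (gRho r) ALL APP (i+1) (r+1)
        (fun j hj1 hj2 => hgetl j (by omega) hj2)
        (fun j hj1 hj2 => hgetRho j (by omega) hj2)
        ((gl p q r i)^2) ((gRho r i)^2)
        (fun j hj1 hj2 => by
          have := gRho_sq_lt r i j hi.1 (by omega) (by omega)
          omega) a b]
    rfl
  rw [foldl_opt_prod (fun i => NFD p q r i) (fun i => DFD r i)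
      (PySem.List.pyRange 1 (r+1) 1) _ hnone hsome 1 1]
  dsimp only
  rw [foldl_pair_mul]
  -- split the outer range 1..r into rows 1, 2 and the cancelling block 3..r
  have hsplit : PySem.List.pyRange 1 (r+1) 1 = 1 :: 2 :: PySem.List.pyRange 3 (r+1) 1 := by
    rw [PySem.List.pyRange_one_cons (by omega : (1:Int) < r+1)]
    rw [show (1:Int)+1 = 2 from by norm_num]
    rw [PySem.List.pyRange_one_cons (by omega : (2:Int) < r+1)]
    rw [show (2:Int)+1 = 3 from by norm_num]
  rw [hsplit]
  simp only [List.map_cons, List.prod_cons]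
  have htail1 : ((PySem.List.pyRange 3 (r+1) 1).map (fun j => (gl p q r 1)^2 - (gl p q r j)^2))
      = ((PySem.List.pyRange 3 (r+1) 1).map (fun j => (gl p q r 1)^2 - (gRho r j)^2)) :=
    List.map_congr_left (fun j hj => by
      rw [PySem.List.mem_pyRange_one] at hj
      rw [gl_eq_gRho p q r j (by omega)])
  have htail2 : ((PySem.List.pyRange 3 (r+1) 1).map (fun j => (gl p q r 2)^2 - (gl p q r j)^2))
      = ((PySem.List.pyRange 3 (r+1) 1).map (fun j => (gl p q r 2)^2 - (gRho r j)^2)) :=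
    List.map_congr_left (fun j hj => by
      rw [PySem.List.mem_pyRange_one] at hj
      rw [gl_eq_gRho p q r j (by omega)])
  have hNFD1 : NFD p q r 1
      = ((gl p q r 1)^2 - (gl p q r 2)^2)
        * ((PySem.List.pyRange 3 (r+1) 1).map (fun j => (gl p q r 1)^2 - (gRho r j)^2)).prod := by
    simp only [NFD]
    rw [show (1:Int)+1 = 2 from by norm_num,
        PySem.List.pyRange_one_cons (by omega : (2:Int) < r+1),
        show (2:Int)+1 = 3 from by norm_num, List.map_cons, List.prod_cons, htail1]
  have hNFD2 : NFD p q r 2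
      = ((PySem.List.pyRange 3 (r+1) 1).map (fun j => (gl p q r 2)^2 - (gRho r j)^2)).prod := by
    simp only [NFD]
    rw [show (2:Int)+1 = 3 from by norm_num, htail2]
  have hDFD1 : DFD r 1
      = ((gRho r 1)^2 - (gRho r 2)^2)
        * ((PySem.List.pyRange 3 (r+1) 1).map (fun j => (gRho r 1)^2 - (gRho r j)^2)).prod := by
    simp only [DFD]
    rw [show (1:Int)+1 = 2 from by norm_num,
        PySem.List.pyRange_one_cons (by omega : (2:Int) < r+1),
        show (2:Int)+1 = 3 from by norm_num, List.map_cons, List.prod_cons]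
  have hDFD2 : DFD r 2
      = ((PySem.List.pyRange 3 (r+1) 1).map (fun j => (gRho r 2)^2 - (gRho r j)^2)).prod := by
    simp only [DFD]
    rw [show (2:Int)+1 = 3 from by norm_num]
  have hNtail : ((PySem.List.pyRange 3 (r+1) 1).map (fun i => NFD p q r i))
      = ((PySem.List.pyRange 3 (r+1) 1).map (fun i => DFD r i)) :=
    List.map_congr_left (fun i hi => by
      rw [PySem.List.mem_pyRange_one] at hi
      simp only [NFD, DFD]
      congr 1
      exact List.map_congr_left (fun j hj => by
        rw [PySem.List.mem_pyRange_one] at hj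
        rw [gl_eq_gRho p q r i (by omega), gl_eq_gRho p q r j (by omega)]))
  rw [hNFD1, hNFD2, hDFD1, hDFD2, hNtail]
  -- rewrite the B-side closed row values through gl/gRho
  rw [show (p+r-1 : Int) = gl p q r 1 from by simp [gl, lamv, gRho]; ring,
      show (q+r-2 : Int) = gl p q r 2 from by simp [gl, lamv, gRho]; ring,
      show (r-1 : Int) = gRho r 1 from by simp [gRho],
      show (r-2 : Int) = gRho r 2 from by simp [gRho]]
  have hBnum : ((PySem.List.pyRange 3 (r+1) 1).map
        (fun j => (gl p q r 1 * gl p q r 1 - (r-j) * (r-j))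
                * (gl p q r 2 * gl p q r 2 - (r-j) * (r-j)))).prod
      = ((PySem.List.pyRange 3 (r+1) 1).map (fun j => (gl p q r 1)^2 - (gRho r j)^2)).prod
        * ((PySem.List.pyRange 3 (r+1) 1).map (fun j => (gl p q r 2)^2 - (gRho r j)^2)).prod := by
    rw [← List.prod_map_mul]
    exact congrArg List.prod (List.map_congr_left (fun j hj => by simp only [gRho]; ring))
  have hBden : ((PySem.List.pyRange 3 (r+1) 1).map
        (fun j => (gRho r 1 * gRho r 1 - (r-j) * (r-j))
                * (gRho r 2 * gRho r 2 - (r-j) * (r-j)))).prod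
      = ((PySem.List.pyRange 3 (r+1) 1).map (fun j => (gRho r 1)^2 - (gRho r j)^2)).prod
        * ((PySem.List.pyRange 3 (r+1) 1).map (fun j => (gRho r 2)^2 - (gRho r j)^2)).prod := by
    rw [← List.prod_map_mul]
    exact congrArg List.prod (List.map_congr_left (fun j hj => by simp only [gRho]; ring))
  rw [hBnum, hBden]
  have hC1 : 0 < ((PySem.List.pyRange 3 (r+1) 1).map (fun i => DFD r i)).prod := by
    apply List.prod_pos
    intro a ha
    obtain ⟨i, hi, rfl⟩ := List.mem_map.mp ha
    rw [PySem.List.mem_pyRange_one] at hi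
    exact DFD_pos r i (by omega) (by omega)
  refine fdiv_scale _ _ _ _
    (((PySem.List.pyRange 3 (r+1) 1).map (fun i => DFD r i)).prod)
    hC1 (by ring) (by ring)

theorem dimSO_eq (p q N : Int) (hN : 5 ≤ N) : dimSO_A p q N = dimSO_B p q N := by
  simp only [dimSO_A, dimSO_B, if_neg (by omega : ¬ N < 5)]
  by_cases hm : PySem.Int.mod N 2 = 1
  · rw [if_pos hm, if_pos hm]
    exact dimB_eq p q _ ((PySem.Int.le_floordiv_iff_mul_le (by norm_num)).mpr (by omega))
  · rw [if_neg hm, if_neg hm]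
    have h0 : PySem.Int.mod N 2 = 0 := by
      have h1 := PySem.Int.mod_nonneg N (by norm_num : (0:Int) < 2)
      have h2 := PySem.Int.mod_lt N (by norm_num : (0:Int) < 2)
      omega
    obtain ⟨k, hk⟩ := (PySem.Int.mod_eq_zero_iff_dvd N 2).mp h0
    exact dimD_eq p q _ ((PySem.Int.le_floordiv_iff_mul_le (by norm_num)).mpr (by omega))

-- ===== VERDICT (by name: the statement is the Claim_ definition above) =====
theorem build_spectrum_spec : Claim_equal_build_spectrum := by
  intro n P_max _hdom hpre
  unfold Spec_build_spectrum
  by_cases hP : P_max ≤ 0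
  · simp only [build_spectrum, build_spectrum_alt,
      PySem.List.pyRange_one_eq_nil (by omega : P_max ≤ 0), List.foldl_nil]
  · have hn : 3 ≤ n := hpre.resolve_right hP
    have hd : ∀ p q : Int, dimSO_A p q (n + 2) = dimSO_B p q (n + 2) :=
      fun p q => dimSO_eq p q (n + 2) (by omega)
    simp only [build_spectrum, build_spectrum_alt, hd]
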